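-- pv_equiv track=rewrite | github.com/CMU15-112/lecture_demos_qatar | week02/longest42.py | longest42run
-- ===== SOURCE A (Python) =====
-- def longest42run(n):
--
--     curr42SeqLen=0
--     longestSeq=0
--
--     while(n>0):
--
--         if n%100 == 42:
--             curr42SeqLen+=1
--             longestSeq= max(curr42SeqLen, longestSeq)
--             n= n//100
--         else:
--             curr42SeqLen= 0
--             n= n//10
--
--     return longestSeq
-- ===== SOURCE B (Python) =====
-- def longest42run(n):
--     if n <= 0:
--         return 0
--     ds = []
--     while n > 0:
--         ds.append(n % 10)
--         n //= 10
--     best = 0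
--     run = 0
--     pending = False
--     for d in ds:
--         if pending:
--             if d == 4:
--                 run += 1
--                 best = max(run, best)
--                 pending = False
--             else:
--                 run = 0
--                 pending = (d == 2)
--         else:
--             if d == 2:
--                 pending = True
--             else:
--                 run = 0
--     return best
-- ===== Notes on version B (the rewrite author's own statement) =====
-- stated objective: alternative
-- what changed: A strips one or two digits at a time from the integer using a modular pair test; B extracts the whole digit list once and then runs a per-digit state-machine fold (pending/run/best) over it.
import Mathlib
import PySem

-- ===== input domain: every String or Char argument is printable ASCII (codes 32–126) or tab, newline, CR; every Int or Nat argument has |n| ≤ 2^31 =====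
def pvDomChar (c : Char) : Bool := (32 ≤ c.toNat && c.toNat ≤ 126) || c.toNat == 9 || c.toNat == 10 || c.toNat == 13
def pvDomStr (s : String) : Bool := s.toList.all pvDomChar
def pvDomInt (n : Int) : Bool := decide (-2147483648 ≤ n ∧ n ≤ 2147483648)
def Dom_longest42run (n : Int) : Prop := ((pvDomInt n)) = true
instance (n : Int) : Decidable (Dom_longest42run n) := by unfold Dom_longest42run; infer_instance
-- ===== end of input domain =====

-- B replaces A's 1-or-2-digit stripping via n%100 with a digit list extracted once and a
-- single-digit state machine fold (objective: alternative, same cost).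

-- termination helper, cited by both ports' decreasing_by
lemma pv_floordiv_toNat_lt (n b : Int) (hn : 0 < n) (hb : 1 < b) :
    (PySem.Int.floordiv n b).toNat < n.toNat := by
  have h1 : PySem.Int.floordiv n b < n := by
    rw [PySem.Int.floordiv_lt_iff_lt_mul (by omega)]
    nlinarith
  have h2 : 0 ≤ PySem.Int.floordiv n b := by
    rw [PySem.Int.floordiv_eq_ediv_of_pos (by omega)]
    exact Int.ediv_nonneg hn.le (by omega)
  omega

-- ===== PORT A =====
-- the while loop of A, state (curr42SeqLen, longestSeq)
def longest42runGo (n curr best : Int) : Int :=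
  if h : 0 < n then
    if PySem.Int.mod n 100 = 42 then
      longest42runGo (PySem.Int.floordiv n 100) (curr + 1) (max (curr + 1) best)
    else
      longest42runGo (PySem.Int.floordiv n 10) 0 best
  else best
termination_by n.toNat
decreasing_by
  · exact pv_floordiv_toNat_lt n 100 h (by norm_num)
  · exact pv_floordiv_toNat_lt n 10 h (by norm_num)

def longest42run (n : Int) : Int := longest42runGo n 0 0

-- ===== PORT B =====
-- the digit-collecting while loop of B (least significant digit first)
def altDigits (n : Int) : List Int :=
  if h : 0 < n then PySem.Int.mod n 10 :: altDigits (PySem.Int.floordiv n 10) else []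
termination_by n.toNat
decreasing_by
  exact pv_floordiv_toNat_lt n 10 h (by norm_num)

-- the body of B's for loop; state (pending, run, best)
def altStep : (Bool × Int × Int) → Int → (Bool × Int × Int)
  | (pending, run, best), d =>
    if pending then
      if d = 4 then (false, run + 1, max (run + 1) best)
      else (decide (d = 2), 0, best)
    else
      if d = 2 then (true, run, best) else (false, 0, best)

def longest42run_alt (n : Int) : Int :=
  if n ≤ 0 then 0
  else ((altDigits n).foldl altStep (false, 0, 0)).2.2

-- ===== PRECONDITION & SPEC =====
def Spec_longest42run (n : Int) (out : Int) : Prop := out = longest42run_alt n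
instance (n : Int) (out : Int) : Decidable (Spec_longest42run n out) := by unfold Spec_longest42run; infer_instance

-- ===== CLAIM (what is proved, stated in full; the proofs are below) =====
def Claim_equal_longest42run : Prop := ∀ (n : Int), Dom_longest42run n → Spec_longest42run n (longest42run n)

-- ===== LEMMAS AND PROOFS =====

-- starting pending with no '4' ahead is the same as starting fresh with run reset
lemma fold_pending (ds : List Int) (run best : Int)
    (h : ∀ d ∈ ds.head?, d ≠ 4) :
    ((ds.foldl altStep (true, run, best)).2.2) = ((ds.foldl altStep (false, 0, best)).2.2) := by
  cases ds with
  | nil => rfl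
  | cons d rest =>
    have hd4 : d ≠ 4 := h d rfl
    by_cases hd2 : d = 2 <;> simp [List.foldl, altStep, hd4, hd2]

lemma altDigits_pos {n : Int} (h : 0 < n) :
    altDigits n = PySem.Int.mod n 10 :: altDigits (PySem.Int.floordiv n 10) := by
  rw [altDigits]; simp [h]

lemma altDigits_nonpos {n : Int} (h : ¬ 0 < n) : altDigits n = [] := by
  rw [altDigits]; simp [h]

lemma go_eq_fold (m : Nat) : ∀ (n curr best : Int), n.toNat ≤ m →
    longest42runGo n curr best = ((altDigits n).foldl altStep (false, curr, best)).2.2 := by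
  induction m with
  | zero =>
    intro n curr best hm
    have hn : ¬ 0 < n := by omega
    rw [longest42runGo, altDigits_nonpos hn]
    simp [hn]
  | succ m ih =>
    intro n curr best hm
    by_cases hn : 0 < n
    · have hdiv10 : PySem.Int.floordiv n 10 = n / 10 := PySem.Int.floordiv_eq_ediv_of_pos (by norm_num)
      have hmod10 : PySem.Int.mod n 10 = n % 10 := PySem.Int.mod_eq_emod_of_pos (by norm_num)
      have hmod100 : PySem.Int.mod n 100 = n % 100 := PySem.Int.mod_eq_emod_of_pos (by norm_num)
      have hfd100 : PySem.Int.floordiv n 100 = n / 100 := PySem.Int.floordiv_eq_ediv_of_pos (by norm_num)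
      have hm10 : (n / 10).toNat ≤ m := by
        have := pv_floordiv_toNat_lt n 10 hn (by norm_num)
        rw [hdiv10] at this; omega
      rw [longest42runGo, dif_pos hn, altDigits_pos hn, hmod10, hdiv10, hmod100, hfd100]
      by_cases h42 : n % 100 = 42
      · -- last two digits are 4,2: A strips both, B's fold takes two steps
        rw [if_pos h42]
        have hd1 : n % 10 = 2 := by omega
        have hq10 : 0 < n / 10 := by omega
        rw [altDigits_pos hq10]
        have e1 : PySem.Int.mod (n / 10) 10 = 4 := by
          rw [PySem.Int.mod_eq_emod_of_pos (by norm_num)]; omega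
        have e2 : PySem.Int.floordiv (n / 10) 10 = n / 100 := by
          rw [PySem.Int.floordiv_eq_ediv_of_pos (by norm_num)]; omega
        rw [e1, e2, hd1]
        simp only [List.foldl, altStep]
        norm_num
        exact ih (n / 100) (curr + 1) (max (curr + 1) best) (by omega)
      · -- last two digits are not 4,2: A strips one digit
        rw [if_neg h42]
        by_cases hd2 : n % 10 = 2
        · -- digit 2: B goes pending; the next digit cannot be '4'
          rw [hd2]
          have hstep : altStep (false, curr, best) 2 = (true, curr, best) := by
            simp [altStep]
          simp only [List.foldl, hstep]
          by_cases hq : 0 < n / 10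
          · have hhead : ∀ d ∈ (altDigits (n / 10)).head?, d ≠ 4 := by
              rw [altDigits_pos hq]
              simp only [List.head?_cons, Option.mem_def, Option.some.injEq]
              intro d hd hc
              rw [PySem.Int.mod_eq_emod_of_pos (by norm_num)] at hd
              omega
            rw [fold_pending _ curr best hhead]
            exact ih (n / 10) 0 best hm10
          · rw [altDigits_nonpos hq, longest42runGo, dif_neg hq]
            rfl
        · have hstep : altStep (false, curr, best) (n % 10) = (false, 0, best) := by
            simp [altStep, hd2]
          simp only [List.foldl, hstep]
          exact ih (n / 10) 0 best hm10
    · rw [longest42runGo, altDigits_nonpos hn]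
      simp [hn]

-- ===== VERDICT (by name: the statement is the Claim_ definition above) =====
theorem longest42run_spec : Claim_equal_longest42run := by
  intro n _
  unfold Spec_longest42run longest42run longest42run_alt
  by_cases hn : n ≤ 0
  · rw [longest42runGo]
    simp [hn, show ¬ 0 < n by omega]
  · rw [if_neg hn]
    exact go_eq_fold n.toNat n 0 0 le_rfl
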